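-- pv_equiv track=rewrite | github.com/luozixin2/Diffulex | diffulex_bench/analyze_kv_trajectory.py | _suffix_all_neg_one
-- ===== SOURCE A (Python) =====
-- def _suffix_all_neg_one(xs: list[int]) -> bool:
--     if not xs:
--         return True
--     seen_neg = False
--     for x in xs:
--         if x < 0:
--             seen_neg = True
--         elif seen_neg:
--             return False
--     return True
-- ===== SOURCE B (Python) =====
-- def _suffix_all_neg_one(xs: list[int]) -> bool:
--     # Local characterization: a non-negative follows a negative somewhere
--     # iff it does so at some ADJACENT pair (the first offending non-negative
--     # is immediately preceded by a negative). So just check adjacent pairs.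
--     return all(not (a < 0 <= b) for a, b in zip(xs, xs[1:]))
-- ===== Notes on version B (the rewrite author's own statement) =====
-- stated objective: alternative
-- what changed: Replaces the stateful seen_neg scan with a stateless local check over adjacent pairs: the property fails iff some adjacent pair (a,b) has a < 0 <= b, so B checks all(zip(xs, xs[1:])) with no carried flag.
import Mathlib
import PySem

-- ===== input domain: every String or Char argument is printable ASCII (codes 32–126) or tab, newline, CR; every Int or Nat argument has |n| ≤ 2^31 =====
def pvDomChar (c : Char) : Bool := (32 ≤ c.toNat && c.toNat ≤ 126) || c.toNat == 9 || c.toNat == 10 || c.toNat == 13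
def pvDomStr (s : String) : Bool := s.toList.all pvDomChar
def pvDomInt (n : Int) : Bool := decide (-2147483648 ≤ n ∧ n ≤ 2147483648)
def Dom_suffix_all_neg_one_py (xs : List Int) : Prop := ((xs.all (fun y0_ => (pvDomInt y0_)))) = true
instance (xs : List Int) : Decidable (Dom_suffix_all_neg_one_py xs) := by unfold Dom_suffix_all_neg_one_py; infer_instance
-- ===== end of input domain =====

-- B replaces A's stateful seen_neg scan with a stateless adjacent-pairs check (no pair a < 0 <= b); objective: alternative.


-- ===== PORT A =====
-- the for-loop over xs carrying the seen_neg flag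
def suffixAllNegLoop : List Int → Bool → Bool
  | [], _ => true
  | x :: rest, seen_neg =>
    if x < 0 then suffixAllNegLoop rest true
    else if seen_neg then false
    else suffixAllNegLoop rest seen_neg

def suffix_all_neg_one_py (xs : List Int) : Bool :=
  if xs = [] then true
  else suffixAllNegLoop xs false

-- ===== PORT B =====
-- all(not (a < 0 <= b) for a, b in zip(xs, xs[1:]))
def suffix_all_neg_one_py_alt (xs : List Int) : Bool :=
  (xs.zip xs.tail).all (fun p => !(decide (p.1 < 0) && decide (0 ≤ p.2)))

-- ===== PRECONDITION & SPEC =====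
def Spec_suffix_all_neg_one_py (xs : List Int) (out : Bool) : Prop := out = suffix_all_neg_one_py_alt xs
instance (xs : List Int) (out : Bool) : Decidable (Spec_suffix_all_neg_one_py xs out) := by unfold Spec_suffix_all_neg_one_py; infer_instance

-- ===== CLAIM =====
def Claim_equal_suffix_all_neg_one_py : Prop := ∀ (xs : List Int), Dom_suffix_all_neg_one_py xs → Spec_suffix_all_neg_one_py xs (suffix_all_neg_one_py xs)

-- ===== LEMMAS AND PROOFS =====
-- once seen_neg is true, A's loop checks the rest is all negative
theorem loop_true_eq_all (xs : List Int) :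
    suffixAllNegLoop xs true = xs.all (fun x => decide (x < 0)) := by
  induction xs with
  | nil => rfl
  | cons x rest ih =>
    simp only [suffixAllNegLoop, List.all_cons]
    by_cases h : x < 0
    · simp [h, ih]
    · simp [h]

-- "all negative" decomposes as "head negative (if any) and no offending adjacent pair"
theorem all_neg_eq_head_and_alt (xs : List Int) :
    xs.all (fun x => decide (x < 0)) =
      ((match xs with | [] => true | y :: _ => decide (y < 0)) && suffix_all_neg_one_py_alt xs) := by
  induction xs with
  | nil => rfl
  | cons y r ih =>
    by_cases hy : y < 0
    · cases r with
      | nil => simp [suffix_all_neg_one_py_alt, hy]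
      | cons z s =>
        have hz : (!decide ((0:Int) ≤ z)) = decide (z < 0) := by
          by_cases h0 : (0:Int) ≤ z <;> simp [h0] ; omega
        simp only [List.all_cons] at ih ⊢
        rw [ih]
        simp only [suffix_all_neg_one_py_alt, List.tail_cons, List.zip_cons_cons, List.all_cons]
        simp [hy, hz]
    · simp [hy]

theorem loop_false_eq_alt (xs : List Int) :
    suffixAllNegLoop xs false = suffix_all_neg_one_py_alt xs := by
  induction xs with
  | nil => rfl
  | cons x rest ih =>
    simp only [suffixAllNegLoop]
    by_cases h : x < 0
    · rw [if_pos h, loop_true_eq_all, all_neg_eq_head_and_alt]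
      cases rest with
      | nil => simp [suffix_all_neg_one_py_alt]
      | cons z s =>
        have hz : (!decide ((0:Int) ≤ z)) = decide (z < 0) := by
          by_cases h0 : (0:Int) ≤ z <;> simp [h0] ; omega
        simp only [suffix_all_neg_one_py_alt, List.tail_cons, List.zip_cons_cons, List.all_cons]
        simp [h, hz]
    · rw [if_neg h, if_neg (by simp)]
      cases rest with
      | nil => simp [suffix_all_neg_one_py_alt, ih]
      | cons z s =>
        have halt : suffix_all_neg_one_py_alt (x :: z :: s) = suffix_all_neg_one_py_alt (z :: s) := by
          simp [suffix_all_neg_one_py_alt, h]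
        rw [halt]; exact ih

-- ===== VERDICT =====
theorem suffix_all_neg_one_py_spec : Claim_equal_suffix_all_neg_one_py := by
  intro xs _
  unfold Spec_suffix_all_neg_one_py suffix_all_neg_one_py
  by_cases h : xs = []
  · subst h; rfl
  · simp [h, loop_false_eq_alt]
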